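-- pv_equiv track=rewrite | github.com/nakoyasha/mizuki | src/Python/GenerateSRSUrl.py | base36encode
-- ===== SOURCE A (Python) =====
-- def base36encode(number):
--     if not isinstance(number, int):
--         raise TypeError('number must be an integer')
--     is_negative = number < 0
--     number = abs(number)
--
--     alphabet, base36 = ['0123456789ABCDEFGHIJKLMNOPQRSTUVWXYZ', '']
--
--     while number:
--         number, i = divmod(number, 36)
--         base36 = alphabet[i] + base36
--     if is_negative:
--         base36 = '-' + base36
--
--     return base36.lower() or alphabet[0].lower()
-- ===== SOURCE B (Python) =====
-- def base36encode(number):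
--     if not isinstance(number, int):
--         raise TypeError('number must be an integer')
--     digits = '0123456789abcdefghijklmnopqrstuvwxyz'
--
--     def go(n):
--         return '' if n == 0 else go(n // 36) + digits[n % 36]
--
--     if number == 0:
--         return '0'
--     if number < 0:
--         return '-' + go(-number)
--     return go(number)
-- ===== Notes on version B (the rewrite author's own statement) =====
-- stated objective: alternative
-- what changed: Replaces the accumulating while/divmod loop over an uppercase alphabet followed by a final .lower() with a recursive helper over the quotient that emits lowercase digits directly and explicit zero/negative cases (no 'or' fallback).
import Mathlib
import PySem

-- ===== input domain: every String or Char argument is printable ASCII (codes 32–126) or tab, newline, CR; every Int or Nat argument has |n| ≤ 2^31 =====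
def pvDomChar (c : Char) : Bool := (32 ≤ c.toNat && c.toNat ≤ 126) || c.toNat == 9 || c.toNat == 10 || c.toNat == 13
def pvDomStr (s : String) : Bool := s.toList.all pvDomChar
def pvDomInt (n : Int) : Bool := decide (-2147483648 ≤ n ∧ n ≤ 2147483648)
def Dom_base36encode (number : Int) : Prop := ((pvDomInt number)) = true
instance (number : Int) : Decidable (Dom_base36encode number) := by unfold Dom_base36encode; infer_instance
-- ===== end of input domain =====

-- B replaces A's accumulating while/divmod loop over an uppercase alphabet (plus final .lower()
-- and 'or' fallback) with a recursive helper emitting lowercase digits and explicit zero/negative cases.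

-- ===== PORT A =====
def pvAlpha : List Char := "0123456789ABCDEFGHIJKLMNOPQRSTUVWXYZ".toList

-- A's while loop; number is nonnegative at every call (it starts as abs(number)), so
-- 'while number' is 'while 0 < number' there; the guard only makes the recursion total.
def base36encodeLoopA (n : Int) (acc : List Char) : List Char :=
  if h : 0 < n then
    base36encodeLoopA (PySem.Int.floordiv n 36)
      (((PySem.List.pyGet? pvAlpha (PySem.Int.mod n 36)).getD '0') :: acc)
  else acc
termination_by n.toNat
decreasing_by
  rw [PySem.Int.floordiv_eq_ediv_of_pos (by omega)]
  omega

def base36encode (number : Int) : String :=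
  let isNeg := number < 0
  let b := base36encodeLoopA |number| []
  let b := if isNeg then '-' :: b else b
  let s := PySem.Str.lower (String.ofList b)
  -- 'base36.lower() or alphabet[0].lower()'
  if s = "" then PySem.Str.lower (String.ofList [(PySem.List.pyGet? pvAlpha 0).getD '0']) else s

-- ===== PORT B =====
def pvDigits : List Char := "0123456789abcdefghijklmnopqrstuvwxyz".toList

-- B's recursive helper go; it is only called with positive arguments, the guard makes it total.
def base36go (n : Int) : List Char :=
  if h : 0 < n then
    base36go (PySem.Int.floordiv n 36) ++ [(PySem.List.pyGet? pvDigits (PySem.Int.mod n 36)).getD '0']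
  else []
termination_by n.toNat
decreasing_by
  rw [PySem.Int.floordiv_eq_ediv_of_pos (by omega)]
  omega

def base36encode_alt (number : Int) : String :=
  if number = 0 then "0"
  else if number < 0 then String.ofList ('-' :: base36go (-number))
  else String.ofList (base36go number)

-- ===== PRECONDITION & SPEC =====
def Spec_base36encode (number : Int) (out : String) : Prop := out = base36encode_alt number
instance (number : Int) (out : String) : Decidable (Spec_base36encode number out) := by unfold Spec_base36encode; infer_instance

-- ===== CLAIM (what is proved, stated in full; the proofs are below) =====
def Claim_equal_base36encode : Prop := ∀ (number : Int), Dom_base36encode number → Spec_base36encode number (base36encode number)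

-- ===== LEMMAS AND PROOFS =====
theorem digit_lower (i : Int) (h0 : 0 ≤ i) (h1 : i < 36) :
    PySem.Chars.lowerChar ((PySem.List.pyGet? pvAlpha i).getD '0')
      = (PySem.List.pyGet? pvDigits i).getD '0' := by
  obtain ⟨k, rfl⟩ := Int.eq_ofNat_of_zero_le h0
  have hk : k < 36 := by exact_mod_cast h1
  interval_cases k <;> decide

theorem loop_lower (n : Int) (acc : List Char) :
    PySem.Chars.lower (base36encodeLoopA n acc) = base36go n ++ PySem.Chars.lower acc := by
  fun_induction base36encodeLoopA n acc with
  | case1 n acc h ih =>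
    have hm0 := PySem.Int.mod_nonneg n (b := 36) (by omega)
    have hm1 := PySem.Int.mod_lt n (b := 36) (by omega)
    rw [ih]
    conv_rhs => rw [base36go, dif_pos h]
    simp only [PySem.Chars.lower, List.map_cons, List.append_assoc, List.singleton_append]
    rw [digit_lower _ hm0 hm1]
  | case2 n acc h =>
    rw [base36go, dif_neg h]; simp

theorem go_ne_nil (n : Int) (h : 0 < n) : base36go n ≠ [] := by
  rw [base36go, dif_pos h]; simp

theorem lower_ofList (l : List Char) :
    PySem.Str.lower (String.ofList l) = String.ofList (PySem.Chars.lower l) := by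
  apply String.toList_injective; simp

theorem ofList_ne_empty (l : List Char) (h : l ≠ []) : String.ofList l ≠ "" := by
  intro he
  exact h (by simpa using congrArg String.toList he)

theorem loop_lower_nil (m : Int) :
    PySem.Chars.lower (base36encodeLoopA m []) = base36go m := by
  rw [loop_lower]; simp [PySem.Chars.lower]

theorem base36encode_spec : Claim_equal_base36encode := by
  intro number _
  unfold Spec_base36encode base36encode base36encode_alt
  dsimp only
  rcases lt_trichotomy number 0 with h | h | h
  · rw [abs_of_neg h, if_pos h, lower_ofList]
    have hcons : PySem.Chars.lower ('-' :: base36encodeLoopA (-number) [])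
        = '-' :: PySem.Chars.lower (base36encodeLoopA (-number) []) := by
      simp only [PySem.Chars.lower, List.map_cons]
      congr 1
    rw [hcons, loop_lower_nil]
    rw [if_neg (ofList_ne_empty _ (List.cons_ne_nil _ _))]
    rw [if_neg (by omega : ¬ number = 0), if_pos h]
  · subst h
    have h0 : base36encodeLoopA |0| [] = [] := by rw [base36encodeLoopA]; simp
    rw [h0]
    decide
  · rw [abs_of_pos h, if_neg (by omega : ¬ number < 0), lower_ofList, loop_lower_nil]
    rw [if_neg (ofList_ne_empty _ (go_ne_nil number h))]
    rw [if_neg (by omega : ¬ number = 0), if_neg (by omega : ¬ number < 0)]
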